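-- pv_equiv track=rewrite | github.com/mariana-jg/TDABuchwald | TP2/TP2.py | max_enemies_eliminated
-- ===== SOURCE A (Python) =====
-- def solution_reconstruction(n, prev_index):
--     solution = []
--     while n > 0:
--         solution.append(n)
--         n = prev_index[n]
--     return solution
--
-- def max_enemies_eliminated(x, f):
--     n = len(x)
--     dp = [0] * (n + 1)
--     prev_index = [0] * (n + 1)
--
--     for i in range(1, n + 1):
--         for j in range(1, i + 1):
--             new_enemies = min(x[i - 1], f[i - j])
--             if dp[j - 1] + new_enemies > dp[i]:
--                 dp[i] = dp[j - 1] + new_enemies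
--                 prev_index[i] = j - 1
--
--     solution = solution_reconstruction(n, prev_index)
--
--     return dp[n], solution[::-1]
-- ===== SOURCE B (Python) =====
-- def max_enemies_eliminated(x, f):
--     # DP carrying the solution paths directly: no prev_index table and no
--     # separate reconstruction pass.
--     n = len(x)
--     vals = [0] * (n + 1)
--     paths = [[] for _ in range(n + 1)]
--     for i in range(1, n + 1):
--         best = 0
--         best_path = []
--         for j in range(1, i + 1):
--             v = vals[j - 1] + min(x[i - 1], f[i - j])
--             if v > best:
--                 best = v
--                 best_path = paths[j - 1]
--         vals[i] = best
--         paths[i] = best_path + [i]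
--     return vals[n], paths[n]
-- ===== Notes on version B (the rewrite author's own statement) =====
-- stated objective: simpler
-- what changed: B drops A's prev_index backpointer table and the separate while-loop reconstruction pass: the DP carries each state's solution path directly and returns paths[n], already in forward order, so no reversal and no second pass are needed.
import Mathlib
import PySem

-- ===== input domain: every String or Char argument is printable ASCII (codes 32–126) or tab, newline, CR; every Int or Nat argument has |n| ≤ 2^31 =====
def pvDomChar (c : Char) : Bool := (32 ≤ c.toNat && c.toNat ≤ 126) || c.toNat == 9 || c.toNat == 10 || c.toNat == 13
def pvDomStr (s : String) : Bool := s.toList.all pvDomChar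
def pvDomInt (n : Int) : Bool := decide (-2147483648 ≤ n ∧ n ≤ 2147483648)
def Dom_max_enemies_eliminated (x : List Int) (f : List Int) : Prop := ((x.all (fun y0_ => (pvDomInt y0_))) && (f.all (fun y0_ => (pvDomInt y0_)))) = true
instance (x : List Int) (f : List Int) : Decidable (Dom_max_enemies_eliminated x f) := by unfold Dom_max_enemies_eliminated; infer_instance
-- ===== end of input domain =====

-- B replaces A's prev_index backpointer table and separate reconstruction pass by a DP
-- that carries each state's solution path directly (objective: simpler decomposition).

-- ===== PORT A =====
-- inner-loop body of A (indices i, j are ≥ 1 and in range under Pre_)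
def pvStepA (x f : List Int) (i : Int) (s : List Int × List Int) (j : Int) : List Int × List Int :=
  let new_enemies := min (PySem.List.pyGetD x (i - 1) 0) (PySem.List.pyGetD f (i - j) 0)
  if PySem.List.pyGetD s.1 (j - 1) 0 + new_enemies > PySem.List.pyGetD s.1 i 0 then
    (s.1.set i.toNat (PySem.List.pyGetD s.1 (j - 1) 0 + new_enemies), s.2.set i.toNat (j - 1))
  else s

-- body of A's outer loop: 'for j in range(1, i + 1): …'
def pvOuterA (x f : List Int) (s : List Int × List Int) (i : Int) : List Int × List Int :=
  (PySem.List.pyRange 1 (i + 1)).foldl (pvStepA x f i) s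

-- 'while n > 0: solution.append(n); n = prev_index[n]' — fuel n.toNat+1 only makes the
-- loop total; it suffices because prev_index[k] < k throughout (proved below).
def pvRecon (fuel : Nat) (n : Int) (prev_index : List Int) : List Int :=
  match fuel with
  | 0 => []
  | fuel + 1 =>
      if 0 < n then n :: pvRecon fuel (PySem.List.pyGetD prev_index n 0) prev_index else []

def solution_reconstruction (n : Int) (prev_index : List Int) : List Int :=
  pvRecon (n.toNat + 1) n prev_index

def max_enemies_eliminated (x : List Int) (f : List Int) : Int × List Int :=
  let n : Int := (x.length : Int)
  let dp : List Int := List.replicate (n.toNat + 1) 0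
  let prev_index : List Int := List.replicate (n.toNat + 1) 0
  let st := (PySem.List.pyRange 1 (n + 1)).foldl (pvOuterA x f) (dp, prev_index)
  let solution := solution_reconstruction n st.2
  (PySem.List.pyGetD st.1 n 0, solution.reverse)  -- solution[::-1] is reverse (PySem.List.slice?_none_none_neg_one)

-- ===== PORT B =====
-- inner-loop body of B: running (best, best_path) over j
def pvStepB (x f vals : List Int) (paths : List (List Int)) (i : Int) (b : Int × List Int) (j : Int) : Int × List Int :=
  let v := PySem.List.pyGetD vals (j - 1) 0 + min (PySem.List.pyGetD x (i - 1) 0) (PySem.List.pyGetD f (i - j) 0)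
  if v > b.1 then (v, PySem.List.pyGetD paths (j - 1) []) else b

-- body of B's outer loop
def pvOuterB (x f : List Int) (st : List Int × List (List Int)) (i : Int) : List Int × List (List Int) :=
  let b := (PySem.List.pyRange 1 (i + 1)).foldl (pvStepB x f st.1 st.2 i) (0, [])
  (st.1.set i.toNat b.1, st.2.set i.toNat (b.2 ++ [i]))

def max_enemies_eliminated_alt (x : List Int) (f : List Int) : Int × List Int :=
  let n : Int := (x.length : Int)
  let st := (PySem.List.pyRange 1 (n + 1)).foldl (pvOuterB x f)
      (List.replicate (n.toNat + 1) 0, List.replicate (n.toNat + 1) [])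
  (PySem.List.pyGetD st.1 n 0, PySem.List.pyGetD st.2 n [])

-- ===== PRECONDITION & SPEC =====
-- Pre_ excludes exactly the inputs where Python A raises IndexError: f shorter than x
-- (the loop reads f[i-j] for i-j up to len(x)-1).
def Pre_max_enemies_eliminated (x : List Int) (f : List Int) : Prop := x.length ≤ f.length
instance (x : List Int) (f : List Int) : Decidable (Pre_max_enemies_eliminated x f) := by
  unfold Pre_max_enemies_eliminated; infer_instance

def pvWitness_max_enemies_eliminated : List Int × List Int := ([2, 3, 1], [3, 1, 1])

def Spec_max_enemies_eliminated (x : List Int) (f : List Int) (out : Int × List Int) : Prop := out = max_enemies_eliminated_alt x f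
instance (x : List Int) (f : List Int) (out : Int × List Int) : Decidable (Spec_max_enemies_eliminated x f out) := by unfold Spec_max_enemies_eliminated; infer_instance

-- ===== CLAIM (what is proved, stated in full; the proofs are below) =====
def Claim_equal_max_enemies_eliminated : Prop := ∀ (x : List Int) (f : List Int), Dom_max_enemies_eliminated x f → Pre_max_enemies_eliminated x f → Spec_max_enemies_eliminated x f (max_enemies_eliminated x f)

-- ===== LEMMAS AND PROOFS =====

lemma pvGetD_nonneg {α : Type} (l : List α) (t : Int) (d : α) (h : 0 ≤ t) :
    PySem.List.pyGetD l t d = l.getD t.toNat d := by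
  have h2 := PySem.List.pyGetD_natCast l t.toNat d
  rwa [Int.toNat_of_nonneg h] at h2

lemma pvGetD_replicate {α : Type} (c : Nat) (a : α) (t : Int) :
    PySem.List.pyGetD (List.replicate c a) t a = a := by
  rcases h : PySem.List.pyGet? (List.replicate c a) t with _ | b
  · exact PySem.List.pyGetD_of_none _ _ _ h
  · have hb := PySem.List.mem_of_pyGet?_eq_some _ h
    rw [List.eq_of_mem_replicate hb] at h
    simp [PySem.List.pyGetD, h]

lemma pvGetD_set_ne {α : Type} (l : List α) (n k : Nat) (v d : α) (h : n ≠ k) :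
    (l.set n v).getD k d = l.getD k d := by
  simp [List.getD_eq_getElem?_getD, h]

lemma pvGetD_set_self {α : Type} (l : List α) (n : Nat) (v d : α) (h : n < l.length) :
    (l.set n v).getD n d = v := by
  simp [List.getD_eq_getElem?_getD, h]

lemma pvSet_self {α : Type} (l : List α) (n : Nat) (a : α) (hlen : n < l.length)
    (h : l.getD n a = a) : l.set n a = l := by
  apply List.ext_getElem?
  intro j
  rw [List.getElem?_set]
  split_ifs with h1
  · subst h1
    rw [List.getD_eq_getElem?_getD] at h
    rcases h2 : l[n]? with _ | b
    · simp_all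
    · simp_all
  · rfl

-- global invariant of A's prev_index table: every positive entry points strictly down
def pvBound (prev : List Int) : Prop :=
  ∀ t : Int, 0 < t → 0 ≤ PySem.List.pyGetD prev t 0 ∧ PySem.List.pyGetD prev t 0 < t

lemma pvRecon_fuel (prev : List Int) (hb : pvBound prev) :
    ∀ (kN : Nat) (k : Int) (f1 f2 : Nat), k.toNat = kN → 0 ≤ k → kN < f1 → kN < f2 →
      pvRecon f1 k prev = pvRecon f2 k prev := by
  intro kN
  induction kN using Nat.strong_induction_on with
  | _ kN ih =>
    intro k f1 f2 hk h0 h1 h2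
    match f1, f2 with
    | f1 + 1, f2 + 1 =>
      simp only [pvRecon]
      by_cases hk0 : 0 < k
      · simp only [hk0, if_true]
        obtain ⟨hb1, hb2⟩ := hb k hk0
        have hlt : (PySem.List.pyGetD prev k 0).toNat < kN := by omega
        rw [ih _ hlt _ f1 ((PySem.List.pyGetD prev k 0).toNat + 1) rfl hb1 (by omega) (by omega),
            ih _ hlt _ f2 ((PySem.List.pyGetD prev k 0).toNat + 1) rfl hb1 (by omega) (by omega)]
      · simp [hk0]

lemma pvRecon_set (prev : List Int) (hb : pvBound prev) (iN : Nat) (v : Int) :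
    ∀ (fl : Nat) (k : Int), 0 ≤ k → k < (iN : Int) →
      pvRecon fl k (prev.set iN v) = pvRecon fl k prev := by
  intro fl
  induction fl with
  | zero => intro k _ _; rfl
  | succ fl ih =>
    intro k h0 hki
    simp only [pvRecon]
    by_cases hk0 : 0 < k
    · have hne : iN ≠ k.toNat := by omega
      have hg : PySem.List.pyGetD (prev.set iN v) k 0 = PySem.List.pyGetD prev k 0 := by
        rw [pvGetD_nonneg _ _ _ h0, pvGetD_nonneg _ _ _ h0, pvGetD_set_ne _ _ _ _ _ hne]
      obtain ⟨hb1, hb2⟩ := hb k hk0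
      rw [hg, ih _ hb1 (by omega)]
    · simp [hk0]

-- joint invariant of the two outer loops after m iterations
def pvInv (x : List Int) (m : Nat) (stA : List Int × List Int) (stB : List Int × List (List Int)) : Prop :=
  stA.1 = stB.1 ∧
  stA.1.length = x.length + 1 ∧ stA.2.length = x.length + 1 ∧ stB.2.length = x.length + 1 ∧
  pvBound stA.2 ∧
  (∀ k : Nat, m < k → k ≤ x.length → stA.1.getD k 0 = 0 ∧ stA.2.getD k 0 = 0 ∧ stB.2.getD k [] = []) ∧
  (∀ k : Nat, k ≤ m → stB.2.getD k [] = (solution_reconstruction (k : Int) stA.2).reverse)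

lemma pv_inner (x f dp prev : List Int) (paths : List (List Int)) (iN : Nat)
    (hlen1 : dp.length = x.length + 1) (hlen2 : prev.length = x.length + 1)
    (hi1 : 1 ≤ iN) (hin : iN ≤ x.length)
    (hdpi : dp.getD iN 0 = 0) (hprevi : prev.getD iN 0 = 0) (hpaths0 : paths.getD 0 [] = []) :
    ∀ t : Nat, t ≤ iN →
      ∃ p : Nat, p < iN ∧
        (PySem.List.pyRange 1 ((t : Int) + 1)).foldl (pvStepA x f (iN : Int)) (dp, prev)
          = (dp.set iN ((PySem.List.pyRange 1 ((t : Int) + 1)).foldl (pvStepB x f dp paths (iN : Int)) (0, [])).1,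
             prev.set iN ((p : Nat) : Int)) ∧
        ((PySem.List.pyRange 1 ((t : Int) + 1)).foldl (pvStepB x f dp paths (iN : Int)) (0, [])).2 = paths.getD p [] := by
  intro t
  induction t with
  | zero =>
    intro _
    have hnil : PySem.List.pyRange 1 (((0:Nat) : Int) + 1) = [] :=
      PySem.List.pyRange_one_eq_nil (by norm_num)
    refine ⟨0, by omega, ?_, ?_⟩
    · rw [hnil]
      simp only [List.foldl_nil]
      rw [pvSet_self dp iN 0 (by omega) hdpi,
          pvSet_self prev iN (((0:Nat) : Nat) : Int) (by omega) (by simpa using hprevi)]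
    · rw [hnil]
      simp only [List.foldl_nil]
      exact hpaths0.symm
  | succ t ih =>
    intro ht
    obtain ⟨p, hp, hA, hB⟩ := ih (by omega)
    have hsplit : PySem.List.pyRange 1 (((t + 1 : Nat) : Int) + 1)
        = PySem.List.pyRange 1 ((t : Int) + 1) ++ [(t : Int) + 1] := by
      push_cast
      exact PySem.List.pyRange_one_succ_right (by omega)
    set sB := (PySem.List.pyRange 1 ((t : Int) + 1)).foldl (pvStepB x f dp paths (iN : Int)) (0, []) with hsB
    have hidx : ((t : Int) + 1 - 1) = ((t : Nat) : Int) := by ring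
    have hlen : iN < (dp.set iN sB.1).length := by simp [List.length_set]; omega
    rw [hsplit]
    simp only [List.foldl_append, List.foldl_cons, List.foldl_nil, ← hsB, hA]
    simp only [pvStepA, pvStepB, hidx, PySem.List.pyGetD_natCast, Int.toNat_natCast]
    rw [pvGetD_set_ne dp iN t sB.1 0 (by omega), pvGetD_set_self dp iN sB.1 0 (by omega)]
    split_ifs with hc
    · exact ⟨t, by omega, by simp [List.set_set], rfl⟩
    · exact ⟨p, hp, rfl, hB⟩

lemma pv_main (x f : List Int) :
    ∀ m : Nat, m ≤ x.length →
      pvInv x m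
        ((PySem.List.pyRange 1 ((m : Int) + 1)).foldl (pvOuterA x f)
          (List.replicate (x.length + 1) 0, List.replicate (x.length + 1) 0))
        ((PySem.List.pyRange 1 ((m : Int) + 1)).foldl (pvOuterB x f)
          (List.replicate (x.length + 1) 0, List.replicate (x.length + 1) [])) := by
  intro m
  induction m with
  | zero =>
    intro _
    have hnil : PySem.List.pyRange 1 (((0:Nat) : Int) + 1) = [] :=
      PySem.List.pyRange_one_eq_nil (by norm_num)
    rw [hnil]
    simp only [List.foldl_nil]
    refine ⟨rfl, by simp, by simp, by simp, ?_, ?_, ?_⟩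
    · intro t ht
      rw [pvGetD_replicate]
      omega
    · intro k h1 h2
      refine ⟨?_, ?_, ?_⟩ <;> simp [List.getD_eq_getElem?_getD, h2]
    · intro k hk
      interval_cases k
      simp [solution_reconstruction, pvRecon, List.getD_eq_getElem?_getD]
  | succ m ihm =>
    intro hm
    obtain ⟨h1, h2, h3, h4, hb, hun, hlink⟩ := ihm (by omega)
    have hsplit : PySem.List.pyRange 1 (((m + 1 : Nat) : Int) + 1)
        = PySem.List.pyRange 1 ((m : Int) + 1) ++ [((m + 1 : Nat) : Int)] := by
      push_cast
      exact PySem.List.pyRange_one_succ_right (by omega)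
    rw [hsplit]
    simp only [List.foldl_append, List.foldl_cons, List.foldl_nil]
    rcases hstA : (PySem.List.pyRange 1 ((m : Int) + 1)).foldl (pvOuterA x f)
        (List.replicate (x.length + 1) 0, List.replicate (x.length + 1) 0) with ⟨dpA, prevA⟩
    rcases hstB : (PySem.List.pyRange 1 ((m : Int) + 1)).foldl (pvOuterB x f)
        (List.replicate (x.length + 1) 0, List.replicate (x.length + 1) []) with ⟨valsB, pathsB⟩
    rw [hstA] at h1 h2 h3 hb hun hlink
    rw [hstB] at h1 h4 hun hlink
    simp only at h1 h2 h3 h4 hb hun hlink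
    subst h1
    have hpaths0 : pathsB.getD 0 [] = [] := by
      have := hlink 0 (by omega)
      simpa [solution_reconstruction, pvRecon] using this
    obtain ⟨p, hp, hA, hB2⟩ := pv_inner x f dpA prevA pathsB (m + 1) h2 h3 (by omega) (by omega)
      (hun (m + 1) (by omega) (by omega)).1 ((hun (m + 1) (by omega) (by omega)).2).1 hpaths0
      (m + 1) le_rfl
    simp only [pvOuterA, pvOuterB, hA, Int.toNat_natCast]
    set sB := (PySem.List.pyRange 1 (((m + 1 : Nat) : Int))).foldl (pvStepB x f dpA pathsB ((m + 1 : Nat) : Int)) (0, []) with hsB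
    have hlen' : m + 1 < dpA.length := by omega
    have hlenp' : m + 1 < prevA.length := by omega
    have hlenpa' : m + 1 < pathsB.length := by omega
    have hbound' : pvBound (prevA.set (m + 1) ((p : Nat) : Int)) := by
      intro t ht
      rw [pvGetD_nonneg _ _ _ (by omega)]
      by_cases hti : t.toNat = m + 1
      · rw [hti, pvGetD_set_self _ _ _ _ hlenp']
        constructor
        · positivity
        · omega
      · rw [pvGetD_set_ne _ _ _ _ _ (by omega)]
        have := hb t ht
        rwa [pvGetD_nonneg _ _ _ (by omega)] at this
    have hstable : ∀ (fl : Nat) (k : Int), 0 ≤ k → k < ((m + 1 : Nat) : Int) →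
        pvRecon fl k (prevA.set (m + 1) ((p : Nat) : Int)) = pvRecon fl k prevA := by
      intro fl k h0 hk
      exact pvRecon_set prevA hb (m + 1) _ fl k h0 (by exact_mod_cast hk)
    refine ⟨rfl, by simp [List.length_set]; omega, by simp [List.length_set]; omega,
      by simp [List.length_set]; omega, hbound', ?_, ?_⟩
    · intro k hk1 hk2
      refine ⟨?_, ?_, ?_⟩ <;> rw [pvGetD_set_ne _ _ _ _ _ (by omega)]
      · exact (hun k (by omega) hk2).1
      · exact (hun k (by omega) hk2).2.1
      · exact (hun k (by omega) hk2).2.2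
    · intro k hk
      by_cases hkm : k = m + 1
      · subst hkm
        rw [pvGetD_set_self _ _ _ _ hlenpa']
        have hrec : solution_reconstruction ((m + 1 : Nat) : Int) (prevA.set (m + 1) ((p : Nat) : Int))
            = ((m + 1 : Nat) : Int) :: solution_reconstruction ((p : Nat) : Int) prevA := by
          simp only [solution_reconstruction, Int.toNat_natCast]
          rw [pvRecon]
          rw [if_pos (by positivity)]
          congr 1
          rw [pvGetD_nonneg _ _ _ (by positivity), Int.toNat_natCast,
              pvGetD_set_self _ _ _ _ hlenp']
          rw [hstable (m + 1) _ (by positivity) (by exact_mod_cast hp)]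
          exact pvRecon_fuel prevA hb p _ (m + 1) (p + 1) (by simp) (by positivity)
            (by omega) (by omega)
        rw [hrec, List.reverse_cons, hB2, hlink p (by omega)]
      · rw [pvGetD_set_ne _ _ _ _ _ (by omega)]
        rw [hlink k (by omega)]
        have hs := hstable (k + 1) ((k : Nat) : Int) (by omega) (by omega)
        simp only [solution_reconstruction, Int.toNat_natCast]
        rw [hs]

-- ===== VERDICT (by name: the statement is the Claim_ definition above) =====
theorem max_enemies_eliminated_spec : Claim_equal_max_enemies_eliminated := by
  intro x f _ _
  unfold Spec_max_enemies_eliminated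
  obtain ⟨h1, h2, h3, h4, hb, hun, hlink⟩ := pv_main x f x.length le_rfl
  show max_enemies_eliminated x f = max_enemies_eliminated_alt x f
  simp only [max_enemies_eliminated, max_enemies_eliminated_alt, Int.toNat_natCast]
  refine Prod.ext ?_ ?_
  · simp only [h1]
  · simp only []
    rw [PySem.List.pyGetD_natCast]
    exact (hlink x.length le_rfl).symm
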